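-- pv_equiv track=rewrite | github.com/MirageM/HackerRankCertificates | HackerRank_Problem_Solving_Intermediate/sortedSum.py | sortedSum
-- ===== SOURCE A (Python) =====
-- class FWT:
-- 	def __init__(self, size):
-- 		self.size = size
-- 		self.arr = [0 for _ in range(self.size)]
--
-- 	def add(self, x, val):
-- 		if x == 0:
-- 			self.arr[0] += val
-- 			return
-- 		while x < self.size:
-- 			self.arr[x] += val
-- 			x += x & (-x)
--
-- 	def rank(self, x):
-- 		if x < 0:
-- 			return 0
-- 		res = self.arr[0]
-- 		while x > 0:
-- 			res += self.arr[x]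
-- 			x &= x - 1
-- 		return res
--
-- def sortedSum(a):
-- 	A_LIMIT = 10**6
-- 	M = 10**9 + 7
-- 	pre = FWT(A_LIMIT + 1)
-- 	post = FWT(A_LIMIT + 1)
-- 	cur_fn = ans = total = 0
-- 	for i in range(len(a)):
-- 		pos = pre.rank(a[i]) + 1
-- 		greater = total - post.rank(a[i])
-- 		cur_fn = (cur_fn + pos * a[i] + greater) % M
-- 		ans = (ans + cur_fn) % M
-- 		pre.add(a[i], 1)
-- 		post.add(a[i], a[i])
-- 		total += a[i]
-- 	return ans
-- ===== SOURCE B (Python) =====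
-- def sortedSum(a):
--     M = 10**9 + 7
--     ans = 0
--     for i in range(len(a)):
--         prefix = sorted(a[:i + 1])
--         cur = sum((j + 1) * v for j, v in enumerate(prefix)) % M
--         ans = (ans + cur) % M
--     return ans
-- ===== Notes on version B (the rewrite author's own statement) =====
-- stated objective: simpler
-- what changed: B replaces the two value-indexed Fenwick trees and the incremental insertion-cost update by the direct definition: for each prefix it sorts the prefix and sums (position+1)*value from scratch, accumulating modulo 10^9+7.
import Mathlib
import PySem

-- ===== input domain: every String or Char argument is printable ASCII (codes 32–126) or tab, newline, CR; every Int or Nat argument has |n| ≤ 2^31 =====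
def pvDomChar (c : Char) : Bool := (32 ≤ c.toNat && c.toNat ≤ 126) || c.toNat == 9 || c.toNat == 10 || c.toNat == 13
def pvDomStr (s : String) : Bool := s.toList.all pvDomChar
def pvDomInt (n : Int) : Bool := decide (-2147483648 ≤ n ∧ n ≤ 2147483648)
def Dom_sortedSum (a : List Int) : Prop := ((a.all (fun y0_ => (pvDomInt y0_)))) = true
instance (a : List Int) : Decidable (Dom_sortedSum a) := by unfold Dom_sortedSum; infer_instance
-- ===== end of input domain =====

-- B replaces A's two value-indexed Fenwick trees by the direct definition (sort each prefix
-- and sum (position+1)*value, accumulating modulo 10^9+7): simpler, not faster.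

-- ===== PORT A =====
-- Python list used as a fixed-size array -> Array Int; arr[i] / arr[i] = v, exact for the
-- in-range indices A uses on Pre_ (Python raises out of range; negative wrap included).
def pyAGet (arr : Array Int) (i : Int) : Int :=
  arr.getD (if i < 0 then i + arr.size else i).toNat 0

def pyASet (arr : Array Int) (i : Int) (v : Int) : Array Int :=
  arr.setIfInBounds (if i < 0 then i + arr.size else i).toNat v

structure FWT where
  size : Int
  arr : Array Int
  deriving Repr

-- FWT.__init__
def fwtInit (size : Int) : FWT := ⟨size, Array.replicate size.toNat 0⟩

-- termination helper for the literal while-loops (cited in decreasing_by only)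
theorem pv_band_pred_lt (x : Int) (h : 0 < x) :
    0 ≤ PySem.Int.band x (x - 1) ∧ PySem.Int.band x (x - 1) < x := by
  have h1 : (0:Int) ≤ x - 1 := by omega
  have := PySem.Int.band_of_nonneg (a := x) (b := x - 1) (by omega) h1
  rw [this]
  constructor
  · positivity
  · have hle : x.toNat &&& (x-1).toNat ≤ (x-1).toNat := Nat.and_le_right
    omega

-- while x < self.size: self.arr[x] += val; x += x & (-x)
def FWT.addLoop (t : FWT) (x val : Int) : FWT :=
  if h : x < t.size ∧ 0 < PySem.Int.band x (-x) then
    FWT.addLoop ⟨t.size, pyASet t.arr x (pyAGet t.arr x + val)⟩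
      (x + PySem.Int.band x (-x)) val
  else t
termination_by (t.size - x).toNat
decreasing_by omega

def FWT.add (t : FWT) (x val : Int) : FWT :=
  if x = 0 then ⟨t.size, pyASet t.arr 0 (pyAGet t.arr 0 + val)⟩
  else t.addLoop x val

-- while x > 0: res += self.arr[x]; x &= x - 1
def FWT.rankLoop (t : FWT) (x res : Int) : Int :=
  if h : 0 < x then
    FWT.rankLoop t (PySem.Int.band x (x - 1)) (res + pyAGet t.arr x)
  else res
termination_by x.toNat
decreasing_by
  have := pv_band_pred_lt x h
  omega

def FWT.rank (t : FWT) (x : Int) : Int :=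
  if x < 0 then 0 else t.rankLoop x (pyAGet t.arr 0)

structure AState where
  pre : FWT
  post : FWT
  cur : Int
  ans : Int
  total : Int

def aStep (M : Int) (st : AState) (ai : Int) : AState :=
  let pos := st.pre.rank ai + 1
  let greater := st.total - st.post.rank ai
  let cur := PySem.Int.mod (st.cur + pos * ai + greater) M
  let ans := PySem.Int.mod (st.ans + cur) M
  ⟨st.pre.add ai 1, st.post.add ai ai, cur, ans, st.total + ai⟩

def sortedSum (a : List Int) : Int :=
  let A_LIMIT : Int := 10 ^ 6
  let M : Int := 10 ^ 9 + 7
  (a.foldl (aStep M) ⟨fwtInit (A_LIMIT + 1), fwtInit (A_LIMIT + 1), 0, 0, 0⟩).ans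

-- ===== PORT B =====
def sortedSum_alt (a : List Int) : Int :=
  let M : Int := 10 ^ 9 + 7
  (PySem.List.pyRange 0 (a.length : Int) 1).foldl
    (fun ans i =>
      let pref := PySem.List.sorted (PySem.List.slice a none (some (i + 1))) (fun x => x) false
      let cur := PySem.Int.mod
        (((PySem.List.enumerate pref 0).map (fun jv => (jv.1 + 1) * jv.2)).sum) M
      PySem.Int.mod (ans + cur) M) 0

-- ===== PRECONDITION & SPEC =====
-- Pre_ excludes exactly the inputs on which A does not return: an element above 10^6 makes
-- FWT.rank index past the array (IndexError), a negative element makes FWT.add loop forever.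
def Pre_sortedSum (a : List Int) : Prop := ∀ x ∈ a, 0 ≤ x ∧ x ≤ 10 ^ 6
instance (a : List Int) : Decidable (Pre_sortedSum a) := by unfold Pre_sortedSum; infer_instance
def pvWitness_sortedSum : List Int := [3, 1, 2, 1]

def Spec_sortedSum (a : List Int) (out : Int) : Prop := out = sortedSum_alt a
instance (a : List Int) (out : Int) : Decidable (Spec_sortedSum a out) := by unfold Spec_sortedSum; infer_instance

-- ===== CLAIM (what is proved, stated in full; the proofs are below) =====
def Claim_equal_sortedSum : Prop := ∀ (a : List Int), Dom_sortedSum a → Pre_sortedSum a → Spec_sortedSum a (sortedSum a)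

-- ===== LEMMAS AND PROOFS =====

-- lowest set bit, on Nat and on the port's Int operands
def lbN (n : Nat) : Nat := n - (n &&& (n - 1))

theorem lbN_odd {n : Nat} (h : n % 2 = 1) : n &&& (n - 1) = n - 1 := by
  apply Nat.eq_of_testBit_eq
  intro i
  cases i with
  | zero =>
      rw [Nat.testBit_and, Nat.testBit_zero, Nat.testBit_zero]
      have h1 : (n - 1) % 2 = 0 := by omega
      simp [h1]
  | succ i =>
      rw [Nat.testBit_and, Nat.testBit_add_one, Nat.testBit_add_one]
      have h1 : (n - 1) / 2 = n / 2 := by omega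
      rw [h1, Bool.and_self]

theorem lbN_even {n : Nat} (h : n % 2 = 0) (h1 : 0 < n) :
    n &&& (n - 1) = 2 * ((n / 2) &&& (n / 2 - 1)) := by
  apply Nat.eq_of_testBit_eq
  intro i
  cases i with
  | zero =>
      rw [Nat.testBit_and, Nat.testBit_zero, Nat.testBit_zero, Nat.testBit_zero]
      have h2 : 2 * (n / 2 &&& (n / 2 - 1)) % 2 = 0 := by omega
      simp [h, h2]
  | succ i =>
      rw [Nat.testBit_and, Nat.testBit_add_one, Nat.testBit_add_one, Nat.testBit_add_one]
      have h2 : (n - 1) / 2 = n / 2 - 1 := by omega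
      have h3 : 2 * (n / 2 &&& (n / 2 - 1)) / 2 = n / 2 &&& (n / 2 - 1) := by omega
      rw [h2, h3, Nat.testBit_and]

theorem lbN_pos {n : Nat} (h : 0 < n) : 1 ≤ lbN n ∧ lbN n ≤ n := by
  have := Nat.and_le_right (n := n) (m := n - 1)
  unfold lbN; omega

theorem lbN_odd' {n : Nat} (h : n % 2 = 1) : lbN n = 1 := by
  have := lbN_odd h; unfold lbN; omega

theorem lbN_even' {n : Nat} (h : n % 2 = 0) (h1 : 0 < n) : lbN n = 2 * lbN (n / 2) := by
  have h2 := lbN_even h h1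
  have h3 := Nat.and_le_right (n := n / 2) (m := n / 2 - 1)
  have h4 := Nat.and_le_right (n := n) (m := n - 1)
  unfold lbN
  omega

theorem lbN_spec : ∀ n : Nat, 0 < n → ∃ k, lbN n = 2 ^ k ∧ 2 ^ (k + 1) ∣ (n - 2 ^ k) ∧ 2 ^ k ≤ n := by
  intro n
  induction n using Nat.strong_induction_on with
  | _ n ih =>
    intro hn
    rcases Nat.even_or_odd n with he | ho
    · have h2 : n % 2 = 0 := Nat.even_iff.mp he
      have hb : 0 < n / 2 := by omega
      obtain ⟨k, hk1, hk2, hk3⟩ := ih (n / 2) (by omega) hb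
      obtain ⟨c, hc⟩ := hk2
      have e0 : 2 ^ (k + 1) = 2 * 2 ^ k := by ring
      have e2 : 2 ^ (k + 1 + 1) * c = 2 * (2 ^ (k + 1) * c) := by ring
      refine ⟨k + 1, ?_, ⟨c, by omega⟩, by omega⟩
      rw [lbN_even' h2 hn, hk1]; ring
    · have h1 : n % 2 = 1 := Nat.odd_iff.mp ho
      exact ⟨0, lbN_odd' h1, ⟨(n - 1) / 2, by omega⟩, by omega⟩

theorem lbN_min : ∀ (j : Nat) {n : Nat}, 0 < n → 2 ^ j ∣ n → 2 ^ j ≤ lbN n := by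
  intro j
  induction j with
  | zero => intro n hn _; simpa using (lbN_pos hn).1
  | succ j ih =>
      intro n hn hd
      obtain ⟨c, hc⟩ := hd
      have e : 2 ^ (j + 1) * c = 2 * (2 ^ j * c) := by ring
      have h2 : n % 2 = 0 := by omega
      have hb : 0 < n / 2 := by omega
      have hd2 : 2 ^ j ∣ n / 2 := ⟨c, by omega⟩
      have := ih hb hd2
      rw [lbN_even' h2 hn]
      omega


theorem lbN_add : ∀ (k : Nat) {m r : Nat}, 2 ^ k ∣ m → 0 < r → r < 2 ^ k → lbN (m + r) = lbN r := by
  intro k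
  induction k with
  | zero => intro m r _ h1 h2; omega
  | succ k ih =>
      intro m r hd h1 h2
      obtain ⟨c, hc⟩ := hd
      have e : 2 ^ (k + 1) * c = 2 * (2 ^ k * c) := by ring
      have hm2 : m % 2 = 0 := by omega
      rcases Nat.even_or_odd r with hre | hro
      · have hr2 : r % 2 = 0 := Nat.even_iff.mp hre
        have hmr2 : (m + r) % 2 = 0 := by omega
        have hp : (0:Nat) < 2 ^ k := by positivity
        have hstep : (m + r) / 2 = m / 2 + r / 2 := by omega
        rw [lbN_even' hmr2 (by omega), lbN_even' hr2 (by omega), hstep,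
          ih ⟨c, by omega⟩ (by omega) (by omega)]
      · have hr2 : r % 2 = 1 := Nat.odd_iff.mp hro
        rw [lbN_odd' (n := m + r) (by omega), lbN_odd' hr2]

theorem lbN_add_self {n : Nat} (h : 0 < n) : 2 * lbN n ≤ lbN (n + lbN n) := by
  obtain ⟨k, hk1, hk2, hk3⟩ := lbN_spec n h
  obtain ⟨c, hc⟩ := hk2
  have e : 2 ^ (k + 1) = 2 * 2 ^ k := by ring
  have e2 : 2 ^ (k + 1) * (c + 1) = 2 ^ (k + 1) * c + 2 ^ (k + 1) := by ring
  have hd : 2 ^ (k + 1) ∣ (n + lbN n) := ⟨c + 1, by rw [hk1]; omega⟩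
  have := lbN_min (k + 1) (by omega) hd
  omega

theorem lbN_in_le {r k : Nat} (h1 : 0 < r) (h2 : r < 2 ^ k) : r + lbN r ≤ 2 ^ k := by
  obtain ⟨j, hj1, hj2, hj3⟩ := lbN_spec r h1
  obtain ⟨c, hc⟩ := hj2
  have hjk : j < k := by
    by_contra hh
    have : 2 ^ k ≤ 2 ^ j := Nat.pow_le_pow_right (by norm_num) (by omega)
    omega
  obtain ⟨d, hd⟩ : 2 ^ (j + 1) ∣ 2 ^ k := pow_dvd_pow 2 (by omega)
  -- r + lbN r = (c + 1) * 2 ^ (j + 1)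
  have e1 : r + lbN r = 2 ^ (j + 1) * (c + 1) := by
    have : 2 ^ (j + 1) = 2 * 2 ^ j := by ring
    have e2 : 2 ^ (j + 1) * (c + 1) = 2 ^ (j+1) * c + 2 ^ (j + 1) := by ring
    omega
  have hp : (0:Nat) < 2 ^ (j + 1) := by positivity
  have e3 : 2 ^ (j + 1) * (d + 1) = 2 ^ (j + 1) * d + 2 ^ (j + 1) := by ring
  have e4 : 2 ^ (j + 1) = 2 * 2 ^ j := by ring
  have hlt : 2 ^ (j + 1) * (c + 1) < 2 ^ (j + 1) * (d + 1) := by omega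
  have : c + 1 ≤ d := by
    have := Nat.lt_of_mul_lt_mul_left (a := 2 ^ (j + 1)) hlt
    omega
  calc r + lbN r = 2 ^ (j + 1) * (c + 1) := e1
    _ ≤ 2 ^ (j + 1) * d := Nat.mul_le_mul_left _ this
    _ = 2 ^ k := hd.symm

theorem lbN_step_le {x i : Nat} (hx : 0 < x) (hxi : x < i) (hint : i - lbN i < x) :
    x + lbN x ≤ i := by
  obtain ⟨k, hk1, hk2, hk3⟩ := lbN_spec i (by omega)
  obtain ⟨c, hc⟩ := hk2
  have e : 2 ^ (k + 1) = 2 * 2 ^ k := by ring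
  set m := i - lbN i with hm
  have e5 : 2 ^ k * (2 * c) = 2 ^ (k + 1) * c := by ring
  have hdm : 2 ^ k ∣ m := ⟨2 * c, by omega⟩
  have hr : x - m < 2 ^ k := by omega
  have hlb : lbN x = lbN (x - m) := by
    have := lbN_add k (m := m) (r := x - m) hdm (by omega) (by omega)
    rw [show m + (x - m) = x by omega] at this
    rw [this]
  have := lbN_in_le (r := x - m) (by omega) hr
  omega

def lbZ (x : Int) : Int := ((lbN x.toNat : Nat) : Int)

theorem band_neg_eq_lbZ {x : Int} (h : 0 < x) : PySem.Int.band x (-x) = lbZ x := by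
  unfold PySem.Int.band lbZ lbN
  rw [if_pos (by omega), if_neg (by omega)]
  have e : (-(-x) - 1).toNat = x.toNat - 1 := by omega
  rw [e]

theorem band_pred_eq {x : Int} (h : 0 < x) : PySem.Int.band x (x - 1) = x - lbZ x := by
  rw [PySem.Int.band_of_nonneg (by omega) (by omega)]
  unfold lbZ lbN
  have e : (x - 1).toNat = x.toNat - 1 := by omega
  rw [e]
  have := Nat.and_le_right (n := x.toNat) (m := x.toNat - 1)
  omega

theorem lbZ_pos {x : Int} (h : 0 < x) : 1 ≤ lbZ x ∧ lbZ x ≤ x := by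
  have := lbN_pos (n := x.toNat) (by omega)
  unfold lbZ; omega

def aChain (size x : Int) : List Int :=
  if h : x < size ∧ 0 < PySem.Int.band x (-x) then
    x :: aChain size (x + PySem.Int.band x (-x))
  else []
termination_by (size - x).toNat
decreasing_by omega

def rChain (x : Int) : List Int :=
  if h : 0 < x then x :: rChain (PySem.Int.band x (x - 1)) else []
termination_by x.toNat
decreasing_by
  have := pv_band_pred_lt x h
  omega

theorem lbZ_add_self {x : Int} (h : 0 < x) : 2 * lbZ x ≤ lbZ (x + lbZ x) := by
  have h1 := lbZ_pos h
  have h2 : (x + ((lbN x.toNat : Nat) : Int)).toNat = x.toNat + lbN x.toNat := by omega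
  have h3 := lbN_add_self (n := x.toNat) (by omega)
  unfold lbZ
  rw [h2]
  omega


theorem aChain_mem {s : Int} : ∀ (x : Int), 1 ≤ x → ∀ i ∈ aChain s x,
    x ≤ i ∧ i < s ∧ i - lbZ i ≤ x - lbZ x := by
  intro x
  induction x using aChain.induct (size := s) with
  | case1 x h ih =>
      intro hx i hi
      rw [aChain, dif_pos h] at hi
      rw [band_neg_eq_lbZ (by omega)] at hi ih
      have hlb := lbZ_pos (x := x) (by omega)
      rcases List.mem_cons.mp hi with rfl | hi
      · exact ⟨le_refl _, h.1, by omega⟩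
      · have hstep := lbZ_add_self (x := x) (by omega)
        obtain ⟨h1, h2, h3⟩ := ih (by omega) i hi
        exact ⟨by omega, h2, by omega⟩
  | case2 x h =>
      intro hx i hi
      rw [aChain, dif_neg h] at hi
      simp at hi

theorem aChain_nodup {s : Int} : ∀ (x : Int), 1 ≤ x → (aChain s x).Nodup := by
  intro x
  induction x using aChain.induct (size := s) with
  | case1 x h ih =>
      intro hx
      rw [aChain, dif_pos h]
      have hb : PySem.Int.band x (-x) = lbZ x := band_neg_eq_lbZ (by omega)
      have hlb := lbZ_pos (x := x) (by omega)
      refine List.nodup_cons.mpr ⟨?_, ih (by omega)⟩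
      intro hmem
      have := (aChain_mem (x + PySem.Int.band x (-x)) (by omega) x hmem).1
      omega
  | case2 x h => intro hx; rw [aChain, dif_neg h]; exact List.nodup_nil

theorem aChain_complete {s : Int} (i : Int) : ∀ (x : Int), 1 ≤ x → x ≤ i → i < s →
    i - lbZ i < x → i ∈ aChain s x := by
  intro x
  induction x using aChain.induct (size := s) with
  | case1 x h ih =>
      intro hx hxi his hcut
      rw [aChain, dif_pos h]
      rcases eq_or_lt_of_le hxi with rfl | hlt
      · exact List.mem_cons_self
      · have hb : PySem.Int.band x (-x) = lbZ x := band_neg_eq_lbZ (by omega)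
        have hlb := lbZ_pos (x := x) (by omega)
        have hlbi := lbZ_pos (x := i) (by omega)
        have hstep : x + lbZ x ≤ i := by
          have := lbN_step_le (x := x.toNat) (i := i.toNat) (by omega) (by omega) (by unfold lbZ at hcut; omega)
          unfold lbZ at *
          omega
        rw [hb]
        rw [hb] at ih
        exact List.mem_cons_of_mem _ (ih (by omega) hstep his (by omega))
  | case2 x h =>
      intro hx hxi his hcut
      exfalso
      rw [band_neg_eq_lbZ (by omega)] at h
      have hlb := lbZ_pos (x := x) (by omega)
      omega

theorem rChain_mem : ∀ (q : Int), ∀ i ∈ rChain q, 1 ≤ i ∧ i ≤ q := by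
  intro q
  induction q using rChain.induct with
  | case1 q h ih =>
      intro i hi
      rw [rChain, dif_pos h] at hi
      rcases List.mem_cons.mp hi with rfl | hi
      · omega
      · have := pv_band_pred_lt q h
        have := ih i hi
        omega
  | case2 q h => intro i hi; rw [rChain, dif_neg h] at hi; simp at hi

theorem rChain_hit (v : Int) : ∀ (q : Int), ∀ (x : Int), 1 ≤ x →
    ((rChain q).map (fun i => if i - lbZ i < x ∧ x ≤ i then v else 0)).sum
      = if x ≤ q then v else 0 := by
  intro q
  induction q using rChain.induct with
  | case1 q h ih =>
      intro x hx
      rw [rChain, dif_pos h]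
      have hb : PySem.Int.band q (q - 1) = q - lbZ q := band_pred_eq h
      have hlb := lbZ_pos h
      rw [List.map_cons, List.sum_cons, ih x hx, hb]
      by_cases h1 : x ≤ q - lbZ q
      · rw [if_neg (by omega), if_pos h1, if_pos (by omega)]; ring
      · by_cases h2 : x ≤ q
        · rw [if_pos (by omega), if_neg h1, if_pos h2]; ring
        · rw [if_neg (by omega), if_neg (by omega), if_neg h2]; ring
  | case2 q h =>
      intro x hx
      rw [rChain, dif_neg h]
      rw [if_neg (by omega)]
      rfl

theorem aChain_rChain_sum {s x q : Int} (v : Int) (hx : 1 ≤ x) (hxs : x < s)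
    (hq : 0 ≤ q) (hqs : q < s) :
    ((rChain q).map (fun i => if i ∈ aChain s x then v else 0)).sum
      = if x ≤ q then v else 0 := by
  rw [List.map_congr_left (fun i hi => ?_), rChain_hit v q x hx]
  have hmem := rChain_mem q i hi
  by_cases hin : i ∈ aChain s x
  · have := aChain_mem (s := s) x hx i hin
    have hlb := lbZ_pos (x := x) (by omega)
    rw [if_pos hin, if_pos (by omega)]
  · rw [if_neg hin, if_neg ?_]
    intro hcond
    exact hin (aChain_complete i x hx hcond.2 (by omega) hcond.1)

theorem pyASet_size (arr : Array Int) (i v : Int) : (pyASet arr i v).size = arr.size := by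
  simp [pyASet]

theorem pyAGet_set_self {arr : Array Int} {i : Int} (h0 : 0 ≤ i) (h1 : i < arr.size) (v : Int) :
    pyAGet (pyASet arr i v) i = v := by
  simp only [pyAGet, pyASet, if_neg (by omega : ¬ i < 0)]
  simp only [Array.getD_eq_getD_getElem?, Array.size_setIfInBounds,
    (by omega : i.toNat < arr.size), getElem?_pos, Array.getElem_setIfInBounds_self, Option.getD_some]

theorem pyAGet_set_ne {arr : Array Int} {i j : Int} (h0 : 0 ≤ i) (h1 : 0 ≤ j) (hne : j ≠ i) (v : Int) :
    pyAGet (pyASet arr i v) j = pyAGet arr j := by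
  simp only [pyAGet, pyASet, if_neg (by omega : ¬ i < 0), if_neg (by omega : ¬ j < 0),
    Array.size_setIfInBounds, Array.getD_eq_getD_getElem?, Array.getElem?_setIfInBounds]
  rw [if_neg (by omega)]

theorem pyAGet_replicate (n : Nat) (i : Int) : pyAGet (Array.replicate n (0:Int)) i = 0 := by
  simp only [pyAGet, Array.getD_eq_getD_getElem?, Array.size_replicate, Array.getElem?_replicate]
  split <;> (split <;> rfl)

def bumpAll (arr : Array Int) (c : List Int) (v : Int) : Array Int :=
  c.foldl (fun ar i => pyASet ar i (pyAGet ar i + v)) arr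

theorem bumpAll_size (c : List Int) : ∀ (arr : Array Int) (v : Int), (bumpAll arr c v).size = arr.size := by
  induction c with
  | nil => intro arr v; rfl
  | cons i c ih =>
      intro arr v
      show (bumpAll (pyASet arr i (pyAGet arr i + v)) c v).size = _
      rw [ih, pyASet_size]

theorem bumpAll_get (c : List Int) : ∀ (arr : Array Int) (v j : Int),
    (∀ i ∈ c, 0 ≤ i ∧ i < arr.size) → c.Nodup → 0 ≤ j →
    pyAGet (bumpAll arr c v) j = pyAGet arr j + (if j ∈ c then v else 0) := by
  induction c with
  | nil => intro arr v j _ _ _; simp [bumpAll]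
  | cons i c ih =>
      intro arr v j hb hnd hj
      obtain ⟨hi0, hisz⟩ := hb i List.mem_cons_self
      have step : bumpAll arr (i :: c) v = bumpAll (pyASet arr i (pyAGet arr i + v)) c v := rfl
      rw [step, ih (pyASet arr i (pyAGet arr i + v)) v j
        (by intro k hk; have := hb k (List.mem_cons_of_mem _ hk); rw [pyASet_size]; exact this)
        (List.nodup_cons.mp hnd).2 hj]
      by_cases hji : j = i
      · subst hji
        rw [pyAGet_set_self hi0 hisz]
        have hni : j ∉ c := (List.nodup_cons.mp hnd).1
        rw [if_neg hni, if_pos List.mem_cons_self]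
        ring
      · rw [pyAGet_set_ne hi0 hj hji]
        by_cases hjc : j ∈ c
        · rw [if_pos hjc, if_pos (List.mem_cons_of_mem _ hjc)]
        · rw [if_neg hjc, if_neg (by simp [hji, hjc])]

def wsum : Int → List Int → Int
  | _, [] => 0
  | k, h :: t => (k + 1) * h + wsum (k + 1) t

theorem wsum_append (l1 : List Int) : ∀ (k : Int) (l2 : List Int),
    wsum k (l1 ++ l2) = wsum k l1 + wsum (k + l1.length) l2 := by
  induction l1 with
  | nil => intro k l2; simp [wsum]
  | cons h t ih =>
      intro k l2
      simp only [List.cons_append, wsum, ih (k + 1) l2, List.length_cons]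
      push_cast
      ring_nf

theorem wsum_shift (l : List Int) : ∀ k : Int, wsum (k + 1) l = wsum k l + l.sum := by
  induction l with
  | nil => intro k; simp [wsum]
  | cons h t ih => intro k; simp only [wsum, ih (k + 1), List.sum_cons]; ring

theorem enum_wsum (l : List Int) : ∀ s : Int,
    ((PySem.List.enumerate l s).map (fun jv => (jv.1 + 1) * jv.2)).sum = wsum s l := by
  induction l with
  | nil => intro s; simp [PySem.List.enumerate_nil, wsum]
  | cons h t ih =>
      intro s
      rw [PySem.List.enumerate_cons, List.map_cons, List.sum_cons, ih (s + 1)]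
      rfl

def S (p : List Int) : List Int := PySem.List.sorted p (fun x => x) false

theorem dropWhile_gt {y : Int} : ∀ (s : List Int), s.Pairwise (· ≤ ·) →
    ∀ z ∈ s.dropWhile (fun z => decide (z ≤ y)), y < z := by
  intro s
  induction s with
  | nil => intro _ z hz; simp at hz
  | cons a s ih =>
      intro hpw z hz
      obtain ⟨ha, hs⟩ := List.pairwise_cons.mp hpw
      by_cases hay : a ≤ y
      · rw [List.dropWhile_cons_of_pos (by simpa using hay)] at hz
        exact ih hs z hz
      · rw [List.dropWhile_cons_of_neg (by simpa using hay)] at hz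
        rcases List.mem_cons.mp hz with rfl | hz
        · omega
        · have := ha z hz; omega

theorem sorted_insert_last (p : List Int) (y : Int) :
    S (p ++ [y]) = (S p).takeWhile (fun z => decide (z ≤ y))
      ++ y :: (S p).dropWhile (fun z => decide (z ≤ y)) := by
  set pr := fun z : Int => decide (z ≤ y) with hpr
  set s := S p with hs
  have hpw : s.Pairwise (· ≤ ·) := PySem.List.sorted_pairwise p (fun x => x)
  have hsp : s.Perm p := PySem.List.sorted_perm p (fun x => x) false
  have hsplit : s.takeWhile pr ++ s.dropWhile pr = s := List.takeWhile_append_dropWhile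
  apply PySem.List.sorted_id_eq_of_perm_of_pairwise
  · have h1 : (s.takeWhile pr ++ y :: s.dropWhile pr).Perm (y :: s) := by
      have := List.perm_middle (a := y) (l₁ := s.takeWhile pr) (l₂ := s.dropWhile pr)
      rwa [hsplit] at this
    exact h1.trans ((hsp.cons y).trans (List.perm_append_singleton y p).symm)
  · rw [List.pairwise_append]
    refine ⟨List.Pairwise.sublist (List.takeWhile_sublist pr) hpw, ?_, ?_⟩
    · rw [List.pairwise_cons]
      exact ⟨fun z hz => le_of_lt (dropWhile_gt s hpw z hz),
        List.Pairwise.sublist (List.dropWhile_sublist pr) hpw⟩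
    · intro a ha b hb
      have h1 : a ≤ y := by
        have := List.mem_takeWhile_imp (p := pr) (l := s) ha
        simpa [hpr] using this
      rcases List.mem_cons.mp hb with rfl | hb
      · exact h1
      · have := dropWhile_gt s hpw b hb; omega

theorem W_append (p : List Int) (y : Int) :
    wsum 0 (S (p ++ [y])) = wsum 0 (S p)
      + ((p.countP (fun z => decide (z ≤ y)) : Int) + 1) * y
      + (p.sum - (p.filter (fun z => decide (z ≤ y))).sum) := by
  set pr := fun z : Int => decide (z ≤ y) with hpr
  set s := S p with hs
  have hpw : s.Pairwise (· ≤ ·) := PySem.List.sorted_pairwise p (fun x => x)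
  have hsp : s.Perm p := PySem.List.sorted_perm p (fun x => x) false
  set t1 := s.takeWhile pr with ht1
  set t2 := s.dropWhile pr with ht2
  have hsplit : t1 ++ t2 = s := List.takeWhile_append_dropWhile
  have ht2f : ∀ z ∈ t2, pr z = false := by
    intro z hz
    have := dropWhile_gt s hpw z hz
    simp [hpr]; omega
  have ht1t : ∀ a ∈ t1, pr a = true := fun a ha => List.mem_takeWhile_imp (p := pr) (l := s) ha
  have hlen : t1.length = p.countP pr := by
    have h1 : s.countP pr = p.countP pr := hsp.countP_eq pr
    have h2 : s.countP pr = t1.countP pr + t2.countP pr := by rw [← hsplit, List.countP_append]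
    have h3 : t1.countP pr = t1.length := by
      rw [List.countP_eq_length_filter, List.filter_eq_self.mpr ht1t]
    have h4 : t2.countP pr = 0 := by
      rw [List.countP_eq_length_filter, List.filter_eq_nil_iff.mpr (by intro a ha; simp [ht2f a ha])]
      rfl
    omega
  have hfil : s.filter pr = t1 := by
    rw [← hsplit, List.filter_append, List.filter_eq_self.mpr ht1t,
      List.filter_eq_nil_iff.mpr (by intro a ha; simp [ht2f a ha])]
    simp
  have hsum1 : t1.sum = (p.filter pr).sum := by rw [← hfil]; exact (hsp.filter pr).sum_eq
  have hsumall : t1.sum + t2.sum = p.sum := by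
    have h5 : s.sum = p.sum := hsp.sum_eq
    rw [← h5, ← hsplit, List.sum_append]
  have ht2sum : t2.sum = p.sum - (p.filter pr).sum := by omega
  have hstep : S (p ++ [y]) = t1 ++ y :: t2 := sorted_insert_last p y
  rw [hstep, wsum_append t1 0 (y :: t2)]
  have hys : wsum ((0:Int) + t1.length) (y :: t2)
      = ((0:Int) + (t1.length:Int) + 1) * y + wsum ((0:Int) + (t1.length:Int) + 1) t2 := rfl
  rw [hys, wsum_shift t2]
  have hws : wsum 0 s = wsum 0 t1 + wsum ((0:Int) + t1.length) t2 := by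
    rw [← hsplit, wsum_append t1 0 t2]
  rw [hws]
  have hc : (t1.length : Int) = (p.countP pr : Int) := by exact_mod_cast hlen
  rw [hc]
  linear_combination ht2sum

theorem addLoop_eq : ∀ (t : FWT) (x v : Int),
    t.addLoop x v = ⟨t.size, bumpAll t.arr (aChain t.size x) v⟩ := by
  intro t x v
  induction t, x using FWT.addLoop.induct (val := v) with
  | case1 t x h ih =>
      rw [FWT.addLoop, dif_pos h, ih]
      conv_rhs => rw [aChain, dif_pos h]
      rfl
  | case2 t x h =>
      rw [FWT.addLoop, dif_neg h, aChain, dif_neg h]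
      rfl

theorem rankLoop_eq : ∀ (t : FWT) (x res : Int),
    t.rankLoop x res = res + ((rChain x).map (fun i => pyAGet t.arr i)).sum := by
  intro t x res
  induction x, res using FWT.rankLoop.induct (t := t) with
  | case1 x res h ih =>
      rw [FWT.rankLoop, dif_pos h, ih]
      conv_rhs => rw [rChain, dif_pos h]
      rw [List.map_cons, List.sum_cons]
      ring
  | case2 x res h =>
      rw [FWT.rankLoop, dif_neg h, rChain, dif_neg h]
      simp

theorem rank_eq (t : FWT) (q : Int) (h : 0 ≤ q) :
    t.rank q = pyAGet t.arr 0 + ((rChain q).map (fun i => pyAGet t.arr i)).sum := by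
  rw [FWT.rank, if_neg (by omega), rankLoop_eq]

def FWTwf (t : FWT) (L : Int) : Prop := t.size = L + 1 ∧ (t.arr.size : Int) = L + 1

theorem add_wf {t : FWT} {L : Int} (hw : FWTwf t L) (x v : Int) : FWTwf (t.add x v) L := by
  unfold FWT.add
  split
  · exact ⟨hw.1, by rw [show (⟨t.size, pyASet t.arr 0 (pyAGet t.arr 0 + v)⟩ : FWT).arr = pyASet t.arr 0 (pyAGet t.arr 0 + v) from rfl, pyASet_size]; exact hw.2⟩
  · rw [addLoop_eq]
    exact ⟨hw.1, by rw [show (⟨t.size, bumpAll t.arr (aChain t.size x) v⟩ : FWT).arr = bumpAll t.arr (aChain t.size x) v from rfl, bumpAll_size]; exact hw.2⟩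

theorem rank_add {t : FWT} {L x q : Int} (hw : FWTwf t L) (v : Int) (hx0 : 0 ≤ x) (hxL : x ≤ L)
    (hq0 : 0 ≤ q) (hqL : q ≤ L) :
    (t.add x v).rank q = t.rank q + (if x ≤ q then v else 0) := by
  have hL : (0:Int) ≤ L := le_trans hx0 hxL
  obtain ⟨hw1, hw2⟩ := hw
  rcases eq_or_lt_of_le hx0 with h0 | hpos
  · -- x = 0
    have hx : x = 0 := h0.symm
    subst hx
    unfold FWT.add
    rw [if_pos rfl]
    rw [rank_eq _ _ hq0, rank_eq _ _ hq0]
    have harr : (⟨t.size, pyASet t.arr 0 (pyAGet t.arr 0 + v)⟩ : FWT).arr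
        = pyASet t.arr 0 (pyAGet t.arr 0 + v) := rfl
    rw [harr]
    rw [pyAGet_set_self (by omega) (by omega) _]
    rw [List.map_congr_left (fun i hi => pyAGet_set_ne (by omega) (by have := rChain_mem q i hi; omega)
      (by have := rChain_mem q i hi; omega) _)]
    rw [if_pos hq0]
    ring
  · -- 1 ≤ x
    unfold FWT.add
    rw [if_neg (by omega), addLoop_eq]
    have harr : (⟨t.size, bumpAll t.arr (aChain t.size x) v⟩ : FWT).arr
        = bumpAll t.arr (aChain t.size x) v := rfl
    rw [rank_eq _ _ hq0, rank_eq _ _ hq0, harr]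
    have hcb : ∀ i ∈ aChain t.size x, 0 ≤ i ∧ i < t.arr.size := by
      intro i hi
      have := aChain_mem (s := t.size) x (by omega) i hi
      omega
    have hnd := aChain_nodup (s := t.size) x (by omega)
    rw [bumpAll_get _ _ _ _ hcb hnd (by omega)]
    have h0nc : (0:Int) ∉ aChain t.size x := by
      intro hc
      have := aChain_mem (s := t.size) x (by omega) 0 hc
      omega
    rw [if_neg h0nc]
    rw [List.map_congr_left (fun i hi => bumpAll_get _ _ _ i hcb hnd
      (by have := rChain_mem q i hi; omega))]
    rw [PySem.List.sum_map_add_int]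
    rw [aChain_rChain_sum v (by omega) (by omega : x < t.size) hq0 (by omega : q < t.size)]
    ring

theorem rank_init {L q : Int} (hL : 0 ≤ L) (h0 : 0 ≤ q) : (fwtInit (L + 1)).rank q = 0 := by
  rw [rank_eq _ _ h0]
  show pyAGet (Array.replicate (L+1).toNat 0) 0
    + ((rChain q).map (fun i => pyAGet (Array.replicate (L+1).toNat 0) i)).sum = 0
  rw [pyAGet_replicate, List.map_congr_left (fun i _ => pyAGet_replicate _ _)]
  simp

theorem init_wf {L : Int} (hL : 0 ≤ L) : FWTwf (fwtInit (L + 1)) L := by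
  refine ⟨rfl, ?_⟩
  show ((Array.replicate (L+1).toNat (0:Int)).size : Int) = L + 1
  rw [Array.size_replicate]
  omega

theorem foldAdd_rank (f : Int → Int) {L q : Int} (hq0 : 0 ≤ q) (hqL : q ≤ L) :
    ∀ (p : List Int) (t : FWT), FWTwf t L → (∀ y ∈ p, 0 ≤ y ∧ y ≤ L) →
    (p.foldl (fun t y => t.add y (f y)) t).rank q
      = t.rank q + ((p.filter (fun y => decide (y ≤ q))).map f).sum := by
  intro p
  induction p with
  | nil => intro t hw hp; simp
  | cons y p ih =>
      intro t hw hp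
      have hy := hp y List.mem_cons_self
      rw [List.foldl_cons, ih _ (add_wf hw y (f y)) (fun z hz => hp z (List.mem_cons_of_mem _ hz)),
        rank_add hw (f y) hy.1 hy.2 hq0 hqL]
      by_cases hyq : y ≤ q
      · rw [if_pos hyq, List.filter_cons_of_pos (by simpa using hyq), List.map_cons, List.sum_cons]
        ring
      · rw [if_neg hyq, List.filter_cons_of_neg (by simpa using hyq)]
        ring

theorem alt_nil : sortedSum_alt [] = 0 := by
  simp [sortedSum_alt, PySem.List.pyRange_one_eq_nil (by omega : (0:Int) ≤ 0)]

theorem alt_append (p : List Int) (y : Int) :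
    sortedSum_alt (p ++ [y]) = PySem.Int.mod (sortedSum_alt p
      + PySem.Int.mod (wsum 0 (S (p ++ [y]))) (10 ^ 9 + 7)) (10 ^ 9 + 7) := by
  simp only [sortedSum_alt]
  have hlen : (((p ++ [y]).length : Nat) : Int) = (p.length : Int) + 1 := by simp
  rw [hlen, PySem.List.pyRange_one_succ_right (by positivity), List.foldl_append]
  rw [PySem.List.foldl_congr_mem _ _
    (fun ans i =>
      let pref := PySem.List.sorted (PySem.List.slice p none (some (i + 1))) (fun x => x) false
      let cur := PySem.Int.mod
        (((PySem.List.enumerate pref 0).map (fun jv => (jv.1 + 1) * jv.2)).sum) (10 ^ 9 + 7)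
      PySem.Int.mod (ans + cur) (10 ^ 9 + 7)) 0
    (by
      intro acc i hi
      have hmem := (PySem.List.mem_pyRange_one).mp hi
      have hsl : PySem.List.slice (p ++ [y]) none (some (i + 1)) = PySem.List.slice p none (some (i + 1)) := by
        rw [PySem.List.slice_to _ (by omega), PySem.List.slice_to _ (by omega),
          List.take_append_of_le_length (by omega)]
      rw [hsl])]
  simp only [List.foldl_cons, List.foldl_nil]
  have hfull : PySem.List.slice (p ++ [y]) none (some ((p.length : Int) + 1)) = p ++ [y] := by
    rw [PySem.List.slice_to _ (by positivity), List.take_of_length_le (by simp)]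
  rw [hfull, enum_wsum]
  rfl

theorem main_loop : ∀ (p : List Int), (∀ x ∈ p, 0 ≤ x ∧ x ≤ 10 ^ 6) →
    p.foldl (aStep (10 ^ 9 + 7)) ⟨fwtInit (10 ^ 6 + 1), fwtInit (10 ^ 6 + 1), 0, 0, 0⟩
      = ⟨p.foldl (fun t y => t.add y 1) (fwtInit (10 ^ 6 + 1)),
         p.foldl (fun t y => t.add y y) (fwtInit (10 ^ 6 + 1)),
         (wsum 0 (S p)) % (10 ^ 9 + 7),
         sortedSum_alt p,
         p.sum⟩ := by
  intro p
  induction p using List.reverseRecOn with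
  | nil =>
      have h1 : S ([] : List Int) = [] := by
        simp [S, PySem.List.sorted_eq_nil_iff]
      simp [h1, wsum, alt_nil]
  | append_singleton p y ih =>
      intro hp
      have hpp : ∀ x ∈ p, 0 ≤ x ∧ x ≤ 10 ^ 6 := fun x hx => hp x (List.mem_append_left _ hx)
      have hy : 0 ≤ y ∧ y ≤ 10 ^ 6 := hp y (List.mem_append_right _ List.mem_cons_self)
      rw [List.foldl_append, List.foldl_append, List.foldl_append, ih hpp]
      simp only [List.foldl_cons, List.foldl_nil]
      show aStep _ _ y = _
      rw [aStep]
      have hM : (0:Int) < 10 ^ 9 + 7 := by norm_num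
      have hwf := init_wf (L := 10 ^ 6) (by norm_num)
      have hrank1 : (p.foldl (fun t y => t.add y 1) (fwtInit (10 ^ 6 + 1))).rank y
          = ((p.countP (fun z => decide (z ≤ y)) : Int)) := by
        rw [foldAdd_rank (fun _ => (1:Int)) hy.1 hy.2 p _ hwf hpp,
          rank_init (by norm_num) hy.1, PySem.List.sum_map_const_int,
          List.countP_eq_length_filter]
        ring
      have hrank2 : (p.foldl (fun t y => t.add y y) (fwtInit (10 ^ 6 + 1))).rank y
          = (p.filter (fun z => decide (z ≤ y))).sum := by
        rw [foldAdd_rank (fun z => z) hy.1 hy.2 p _ hwf hpp,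
          rank_init (by norm_num) hy.1, List.map_id']
        ring
      have hcur : PySem.Int.mod ((wsum 0 (S p)) % (10 ^ 9 + 7)
            + ((p.foldl (fun t y => t.add y 1) (fwtInit (10 ^ 6 + 1))).rank y + 1) * y
            + (p.sum - (p.foldl (fun t y => t.add y y) (fwtInit (10 ^ 6 + 1))).rank y)) (10 ^ 9 + 7)
          = (wsum 0 (S (p ++ [y]))) % (10 ^ 9 + 7) := by
        rw [hrank1, hrank2, PySem.Int.mod_eq_emod_of_pos hM]
        rw [show (wsum 0 (S p)) % (10 ^ 9 + 7)
            + ((p.countP (fun z => decide (z ≤ y)) : Int) + 1) * y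
            + (p.sum - (p.filter (fun z => decide (z ≤ y))).sum)
          = (wsum 0 (S p)) % (10 ^ 9 + 7)
            + (((p.countP (fun z => decide (z ≤ y)) : Int) + 1) * y
              + (p.sum - (p.filter (fun z => decide (z ≤ y))).sum)) by ring]
        rw [Int.emod_add_emod]
        congr 1
        rw [W_append p y]
        ring
      simp only [AState.mk.injEq]
      refine ⟨trivial, trivial, ?_, ?_, by rw [List.sum_append, List.sum_cons, List.sum_nil]; ring⟩
      · exact hcur
      · rw [hcur, alt_append p y]
        simp only [PySem.Int.mod_eq_emod_of_pos hM]

theorem final (a : List Int) (hp : ∀ x ∈ a, 0 ≤ x ∧ x ≤ 10 ^ 6) : sortedSum a = sortedSum_alt a := by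
  show (a.foldl (aStep (10 ^ 9 + 7)) ⟨fwtInit (10 ^ 6 + 1), fwtInit (10 ^ 6 + 1), 0, 0, 0⟩).ans
    = sortedSum_alt a
  rw [main_loop a hp]

-- ===== VERDICT (by name: the statement is the Claim_ definition above) =====
theorem sortedSum_spec : Claim_equal_sortedSum := by
  intro a _hdom hpre
  show sortedSum a = sortedSum_alt a
  exact final a hpre
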